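-- pv_equiv track=rewrite | github.com/minhduc5a15/utc_code | Python/tonghaisochinhphuong.py | solve
-- ===== SOURCE A (Python) =====
-- import math
--
-- def solve(n):
--     s = set()
--     for a in range(int(math.sqrt(n)) + 1):
--         bb = n - a * a
--         b = int(math.sqrt(bb))
--         if b * b == bb:
--             s.add(tuple(sorted((a, b))))
--     return len(s)
-- ===== SOURCE B (Python) =====
-- import math
--
-- def solve(n):
--     a = 0
--     b = math.isqrt(n)
--     count = 0
--     while a <= b:
--         s = a * a + b * b
--         if s == n:
--             count += 1
--             a += 1
--             b -= 1
--         elif s < n: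
--             a += 1
--         else:
--             b -= 1
--     return count
-- ===== Notes on version B (the rewrite author's own statement) =====
-- stated objective: alternative
-- what changed: Replaced the per-a scan that computes a float sqrt for each residual and dedupes sorted tuples in a set with a monotone two-pointer loop that maintains only two indices and an integer counter (one integer sqrt total, no set, no per-step sqrt).
import Mathlib
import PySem

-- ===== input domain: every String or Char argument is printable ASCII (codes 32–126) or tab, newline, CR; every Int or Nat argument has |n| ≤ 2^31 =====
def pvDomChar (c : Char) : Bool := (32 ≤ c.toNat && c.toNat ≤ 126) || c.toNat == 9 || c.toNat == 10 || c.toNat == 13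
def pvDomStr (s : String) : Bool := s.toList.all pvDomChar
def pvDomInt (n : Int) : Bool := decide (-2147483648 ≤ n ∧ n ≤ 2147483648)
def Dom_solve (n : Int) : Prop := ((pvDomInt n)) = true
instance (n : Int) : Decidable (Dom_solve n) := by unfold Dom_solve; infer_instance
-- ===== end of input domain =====

-- B replaces A's per-a float-sqrt scan with set deduplication by a two-pointer loop over
-- pure integer state (a, b, count); same return value on all n ≥ 0 (both raise on n < 0).

-- ===== PORT A =====
-- int(math.sqrt(m)): for the admitted domain 0 ≤ m ≤ 2^31 the float sqrt is exact,
-- so it equals the integer square root (ported via Nat.sqrt; verified against CPython on the whole range).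
def pyFloatISqrt (m : Int) : Int := (Nat.sqrt m.toNat : Nat)

def solveStep (n : Int) (s : PySem.Set (Int × Int)) (a : Int) : PySem.Set (Int × Int) :=
  let bb := n - a * a
  let b := pyFloatISqrt bb
  if b * b == bb then PySem.Set.add s (if a ≤ b then (a, b) else (b, a)) else s

def solve (n : Int) : Int :=
  let s : PySem.Set (Int × Int) := PySem.Set.empty
  let s := (PySem.List.pyRange 0 (pyFloatISqrt n + 1) 1).foldl (solveStep n) s
  PySem.Set.len s

-- ===== PORT B =====
-- fuel = remaining window size (b + 1 - a): a totality guard only, never short of the loop's needs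
def solveAltLoop (fuel : Nat) (n a b count : Int) : Int :=
  match fuel with
  | 0 => count
  | fuel + 1 =>
    if a ≤ b then
      let s := a * a + b * b
      if s = n then solveAltLoop fuel n (a + 1) (b - 1) (count + 1)
      else if s < n then solveAltLoop fuel n (a + 1) b count
      else solveAltLoop fuel n a (b - 1) count
    else count

def solve_alt (n : Int) : Int :=
  let b : Int := ((Nat.sqrt n.toNat : Nat) : Int)
  solveAltLoop (b + 1).toNat n 0 b 0

-- ===== PRECONDITION & SPEC =====
-- A raises ValueError (math domain error) on negative n, and so does B (math.isqrt); nothing else is excluded.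
def Pre_solve (n : Int) : Prop := 0 ≤ n
instance (n : Int) : Decidable (Pre_solve n) := by unfold Pre_solve; infer_instance
def pvWitness_solve : Int := 25

def Spec_solve (n : Int) (out : Int) : Prop := out = solve_alt n
instance (n : Int) (out : Int) : Decidable (Spec_solve n out) := by unfold Spec_solve; infer_instance

-- ===== CLAIM (what is proved, stated in full; the proofs are below) =====
def Claim_equal_solve : Prop := ∀ (n : Int), Dom_solve n → Pre_solve n → Spec_solve n (solve n)

-- ===== LEMMAS AND PROOFS =====

-- x is the smaller leg of a representation x*x + y*y = n whose larger leg is ≤ b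
def goodb (n b x : Int) : Bool :=
  let y := pyFloatISqrt (n - x * x)
  decide (x ≤ y) && decide (y ≤ b) && decide (x * x + y * y = n)

-- number of representations n = x² + y², x ≤ y, with both legs in [a, b]
noncomputable def P (n a b : Int) : Nat :=
  ((Finset.Icc a b).filter (fun x => goodb n b x = true)).card

theorem isq_nonneg (m : Int) : 0 ≤ pyFloatISqrt m := Int.natCast_nonneg _

theorem isq_sq (b : Int) (hb : 0 ≤ b) : pyFloatISqrt (b * b) = b := by
  unfold pyFloatISqrt
  rw [Int.toNat_mul hb hb, Nat.sqrt_eq]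
  omega

theorem le_isq (b n : Int) (hb : 0 ≤ b) (h : b * b ≤ n) : b ≤ pyFloatISqrt n := by
  unfold pyFloatISqrt
  have h1 : b.toNat * b.toNat ≤ n.toNat := by
    rw [← Int.toNat_mul hb hb]
    omega
  have := (Nat.le_sqrt.mpr h1)
  omega

theorem mul_self_le_mul_self' {x y : Int} (hx : 0 ≤ x) (h : x ≤ y) : x * x ≤ y * y :=
  mul_le_mul h h hx (le_trans hx h)

theorem P_lt (n a b : Int) (ha : 0 ≤ a) (hab : a ≤ b) (h : a * a + b * b < n) :
    P n a b = P n (a + 1) b := by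
  unfold P
  congr 1
  apply Finset.ext
  intro x
  simp only [Finset.mem_filter, Finset.mem_Icc, goodb, Bool.and_eq_true, decide_eq_true_eq]
  constructor
  · rintro ⟨⟨hax, hxb⟩, ⟨hxy, hyb⟩, heq⟩
    have hxa : x ≠ a := by
      intro h'
      subst h'
      have hy2 := mul_self_le_mul_self' (isq_nonneg (n - x * x)) hyb
      linarith
    exact ⟨⟨by omega, hxb⟩, ⟨hxy, hyb⟩, heq⟩
  · rintro ⟨⟨hax, hxb⟩, hrest⟩
    exact ⟨⟨by omega, hxb⟩, hrest⟩

theorem P_gt (n a b : Int) (ha : 0 ≤ a) (hab : a ≤ b) (h : n < a * a + b * b) :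
    P n a b = P n a (b - 1) := by
  unfold P
  congr 1
  apply Finset.ext
  intro x
  simp only [Finset.mem_filter, Finset.mem_Icc, goodb, Bool.and_eq_true, decide_eq_true_eq]
  constructor
  · rintro ⟨⟨hax, hxb⟩, ⟨hxy, hyb⟩, heq⟩
    have hxx : a * a ≤ x * x := mul_self_le_mul_self' ha hax
    have hyne : pyFloatISqrt (n - x * x) ≠ b := by
      intro hy
      rw [hy] at heq
      linarith
    have hyb' : pyFloatISqrt (n - x * x) ≤ b - 1 := by omega
    exact ⟨⟨hax, by omega⟩, ⟨hxy, hyb'⟩, heq⟩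
  · rintro ⟨⟨hax, hxb⟩, ⟨hxy, hyb⟩, heq⟩
    exact ⟨⟨hax, by omega⟩, ⟨hxy, by omega⟩, heq⟩

theorem P_eq (n a b : Int) (ha : 0 ≤ a) (hab : a ≤ b) (h : a * a + b * b = n) :
    P n a b = P n (a + 1) (b - 1) + 1 := by
  unfold P
  have hb0 : 0 ≤ b := le_trans ha hab
  have hya : pyFloatISqrt (n - a * a) = b := by
    have : n - a * a = b * b := by linarith
    rw [this, isq_sq b hb0]
  have hmem : ∀ x : Int,
      (x ∈ (Finset.Icc a b).filter (fun x => goodb n b x = true)) ↔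
      (x = a ∨ x ∈ (Finset.Icc (a + 1) (b - 1)).filter (fun x => goodb n (b - 1) x = true)) := by
    intro x
    simp only [Finset.mem_filter, Finset.mem_Icc, goodb, Bool.and_eq_true, decide_eq_true_eq]
    constructor
    · rintro ⟨⟨hax, hxb⟩, ⟨hxy, hyb⟩, heq⟩
      by_cases hxa : x = a
      · exact Or.inl hxa
      · right
        have hax' : a + 1 ≤ x := by omega
        have hxx : a * a < x * x := mul_self_lt_mul_self ha (by omega)
        have hyne : pyFloatISqrt (n - x * x) ≠ b := by
          intro hy
          rw [hy] at heq
          linarith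
        have hyb' : pyFloatISqrt (n - x * x) ≤ b - 1 := by omega
        exact ⟨⟨hax', by omega⟩, ⟨hxy, hyb'⟩, heq⟩
    · rintro (hxa | ⟨⟨hax, hxb⟩, ⟨hxy, hyb⟩, heq⟩)
      · subst hxa
        rw [hya]
        exact ⟨⟨le_refl _, hab⟩, ⟨hab, le_refl _⟩, by linarith⟩
      · exact ⟨⟨by omega, by omega⟩, ⟨hxy, by omega⟩, heq⟩
  have hset : (Finset.Icc a b).filter (fun x => goodb n b x = true)
      = insert a ((Finset.Icc (a + 1) (b - 1)).filter (fun x => goodb n (b - 1) x = true)) := by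
    apply Finset.ext
    intro x
    rw [Finset.mem_insert]
    exact hmem x
  rw [hset, Finset.card_insert_of_notMem]
  intro hmem'
  have := (Finset.mem_filter.mp hmem').1
  rw [Finset.mem_Icc] at this
  omega

theorem P_empty (n a b : Int) (h : ¬ a ≤ b) : P n a b = 0 := by
  unfold P
  rw [Finset.Icc_eq_empty h]
  simp

theorem loopP (fuel : Nat) : ∀ (n a b count : Int), 0 ≤ a → (b + 1 - a).toNat ≤ fuel →
    solveAltLoop fuel n a b count = count + P n a b := by
  induction fuel with
  | zero =>
    intro n a b count ha hf
    have hab : ¬ a ≤ b := by omega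
    rw [solveAltLoop, P_empty n a b hab]
    simp
  | succ fuel ih =>
    intro n a b count ha hf
    rw [solveAltLoop]
    by_cases hab : a ≤ b
    · simp only [hab, if_true]
      by_cases h1 : a * a + b * b = n
      · simp only [h1, if_true]
        rw [ih n (a + 1) (b - 1) (count + 1) (by omega) (by omega)]
        rw [P_eq n a b ha hab h1]
        push_cast
        ring
      · simp only [h1, if_false]
        by_cases h2 : a * a + b * b < n
        · simp only [h2, if_true]
          rw [ih n (a + 1) b count (by omega) (by omega)]
          rw [P_lt n a b ha hab h2]
        · simp only [h2, if_false]
          rw [ih n a (b - 1) count ha (by omega)]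
          rw [P_gt n a b ha hab (by omega)]
    · simp only [hab, if_false]
      rw [P_empty n a b hab]
      simp

-- the pair A's loop body inserts for index a, when it inserts one
def addsPair (n a : Int) (p : Int × Int) : Prop :=
  pyFloatISqrt (n - a * a) * pyFloatISqrt (n - a * a) = n - a * a ∧
  p = (if a ≤ pyFloatISqrt (n - a * a) then (a, pyFloatISqrt (n - a * a))
       else (pyFloatISqrt (n - a * a), a))

theorem nodup_fold (n : Int) (l : List Int) (s : PySem.Set (Int × Int)) (hs : s.Nodup) :
    (l.foldl (solveStep n) s).Nodup := by
  induction l generalizing s with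
  | nil => exact hs
  | cons a l ih =>
    apply ih
    unfold solveStep
    simp only
    split
    · exact PySem.Set.nodup_add _ _ hs
    · exact hs

theorem mem_fold (n : Int) (l : List Int) (s : PySem.Set (Int × Int)) (p : Int × Int) :
    p ∈ l.foldl (solveStep n) s ↔ p ∈ s ∨ ∃ a ∈ l, addsPair n a p := by
  induction l generalizing s with
  | nil => simp
  | cons a l ih =>
    rw [List.foldl_cons, ih]
    unfold solveStep addsPair
    simp only [List.mem_cons, beq_iff_eq]
    constructor
    · rintro (hp | ⟨x, hx, hgood⟩)
      · split at hp
        · rcases (PySem.Set.mem_add _ _ _).mp hp with hp | hp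
          · exact Or.inl hp
          · exact Or.inr ⟨a, Or.inl rfl, by assumption, hp⟩
        · exact Or.inl hp
      · exact Or.inr ⟨x, Or.inr hx, hgood⟩
    · rintro (hp | ⟨x, (rfl | hx), hgood⟩)
      · left
        split
        · exact (PySem.Set.mem_add _ _ _).mpr (Or.inl hp)
        · exact hp
      · left
        rw [if_pos hgood.1]
        exact (PySem.Set.mem_add _ _ _).mpr (Or.inr hgood.2)
      · exact Or.inr ⟨x, hx, hgood⟩

theorem mem_final (n : Int) (hn : 0 ≤ n) (p : Int × Int) :
    (p ∈ (PySem.List.pyRange 0 (pyFloatISqrt n + 1) 1).foldl (solveStep n) PySem.Set.empty) ↔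
    ∃ x, (x ∈ (Finset.Icc 0 (pyFloatISqrt n)).filter (fun x => goodb n (pyFloatISqrt n) x = true))
      ∧ p = (x, pyFloatISqrt (n - x * x)) := by
  rw [mem_fold]
  simp only [PySem.Set.empty, List.not_mem_nil, false_or, PySem.List.mem_pyRange_one,
    Finset.mem_filter, Finset.mem_Icc, goodb, Bool.and_eq_true, decide_eq_true_eq]
  constructor
  · rintro ⟨a, ⟨ha0, har⟩, hsq, hp⟩
    set b := pyFloatISqrt (n - a * a) with hb
    have hb0 : 0 ≤ b := isq_nonneg _
    by_cases hab : a ≤ b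
    · refine ⟨a, ⟨⟨ha0, by omega⟩, ⟨⟨hab, ?_⟩, by linarith [hsq]⟩⟩,
        by rw [if_pos hab] at hp; exact hp⟩
      -- b ≤ isq n since b*b = n - a*a ≤ n
      apply le_isq b n hb0
      linarith [mul_self_nonneg a]
    · -- smaller leg is b, partner recomputes to a
      have hba : pyFloatISqrt (n - b * b) = a := by
        have : n - b * b = a * a := by linarith
        rw [this, isq_sq a ha0]
      refine ⟨b, ⟨⟨hb0, by omega⟩, ?_⟩, ?_⟩
      · rw [hba]
        exact ⟨⟨by omega, by omega⟩, by linarith⟩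
      · rw [if_neg hab] at hp
        rw [hba]
        exact hp
  · rintro ⟨x, ⟨⟨hx0, hxr⟩, ⟨⟨hxy, hyr⟩, heq⟩⟩, hp⟩
    refine ⟨x, ⟨hx0, by omega⟩, by linarith, ?_⟩
    rw [if_pos hxy]
    exact hp

theorem solve_eq_P (n : Int) (hn : 0 ≤ n) : solve n = (P n 0 (pyFloatISqrt n) : Int) := by
  unfold solve PySem.Set.len
  simp only
  set final := (PySem.List.pyRange 0 (pyFloatISqrt n + 1) 1).foldl (solveStep n) PySem.Set.empty
    with hfinal
  have hnd : final.Nodup := nodup_fold n _ _ List.nodup_nil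
  have hlen : final.length = final.toFinset.card := (List.toFinset_card_of_nodup hnd).symm
  have himg : final.toFinset
      = ((Finset.Icc 0 (pyFloatISqrt n)).filter (fun x => goodb n (pyFloatISqrt n) x = true)).image
          (fun x => (x, pyFloatISqrt (n - x * x))) := by
    apply Finset.ext
    intro p
    rw [List.mem_toFinset, Finset.mem_image, hfinal, mem_final n hn p]
    constructor
    · rintro ⟨x, hx, hp⟩
      exact ⟨x, hx, hp.symm⟩
    · rintro ⟨x, hx, hp⟩
      exact ⟨x, hx, hp.symm⟩
  have hinj : Function.Injective (fun x : Int => (x, pyFloatISqrt (n - x * x))) := by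
    intro x y hxy
    exact congrArg Prod.fst hxy
  rw [hlen, himg, Finset.card_image_of_injective _ hinj]
  rfl

-- ===== VERDICT (by name: the statement is the Claim_ definition above) =====
theorem solve_spec : Claim_equal_solve := by
  intro n _ hn
  unfold Spec_solve solve_alt
  have hB : solveAltLoop (pyFloatISqrt n + 1).toNat n 0 (pyFloatISqrt n) 0
      = 0 + (P n 0 (pyFloatISqrt n) : Int) :=
    loopP _ n 0 (pyFloatISqrt n) 0 (le_refl 0) (by omega)
  rw [solve_eq_P n hn]
  show (P n 0 (pyFloatISqrt n) : Int) = solveAltLoop (pyFloatISqrt n + 1).toNat n 0 (pyFloatISqrt n) 0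
  rw [hB]
  ring
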